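-- pv_equiv track=rewrite | github.com/dheeraj7596/DPPred | py/train.py | get_conflict_pseudolabels
-- ===== SOURCE A (Python) =====
-- def get_conflict_pseudolabels(label_to_inds):
--     ints_inds = set()
--     for l in label_to_inds:
--         for j in label_to_inds:
--             if l == j:
--                 continue
--             ints_inds.update(label_to_inds[l].intersection(label_to_inds[j]))
--     return ints_inds
-- ===== SOURCE B (Python) =====
-- def get_conflict_pseudolabels(label_to_inds):
--     conflicts = set()
--     sets = list(label_to_inds.values())
--     while sets:
--         s = sets.pop(0)
--         for t in sets:
--             conflicts |= s & t
--     return conflicts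
-- ===== Notes on version B (the rewrite author's own statement) =====
-- stated objective: faster
-- what changed: A loops over all ordered key pairs of the dict (n^2 iterations) with an l==j guard and two dict lookups per pair, intersecting every unordered pair of sets twice; B drops the keys entirely and peels the value sets off a worklist, intersecting each set only with the sets after it, so each unordered pair is intersected exactly once and no dict lookup or key comparison remains.
import Mathlib
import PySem

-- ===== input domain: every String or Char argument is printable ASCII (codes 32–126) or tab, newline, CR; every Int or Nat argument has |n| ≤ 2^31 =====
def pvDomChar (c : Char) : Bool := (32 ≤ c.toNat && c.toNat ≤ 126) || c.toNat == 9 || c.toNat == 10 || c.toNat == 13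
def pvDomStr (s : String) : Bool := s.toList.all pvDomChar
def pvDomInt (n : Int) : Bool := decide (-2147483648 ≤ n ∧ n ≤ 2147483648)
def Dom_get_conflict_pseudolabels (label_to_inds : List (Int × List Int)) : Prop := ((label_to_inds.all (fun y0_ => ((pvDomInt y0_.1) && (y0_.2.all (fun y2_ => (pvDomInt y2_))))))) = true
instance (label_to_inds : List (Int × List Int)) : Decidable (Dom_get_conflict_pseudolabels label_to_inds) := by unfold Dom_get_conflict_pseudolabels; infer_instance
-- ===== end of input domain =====

-- B drops A's double loop over key pairs (with its l==j guard and per-pair dict lookups) and instead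
-- peels the value sets off a worklist, intersecting each set once with each later set; objective: faster (constant-factor: half the intersections, no per-pair dict lookups).


-- ===== PORT A =====
def get_conflict_pseudolabels (label_to_inds : List (Int × List Int)) : List Int :=
  let d : PySem.Dict Int (List Int) := PySem.Dict.mk label_to_inds
  (PySem.Dict.keys d).foldl
    (fun ints_inds l =>
      (PySem.Dict.keys d).foldl
        (fun acc j =>
          if l == j then acc
          else PySem.Set.update acc
                 (PySem.Set.inter (PySem.Dict.getD d l []) (PySem.Dict.getD d j [])))
        ints_inds)
    []

-- ===== PORT B =====
-- the 'while sets: s = sets.pop(0); for t in sets: conflicts |= s & t' worklist of Source B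
def pvPeel (sets : List (List Int)) (conflicts : PySem.Set Int) : PySem.Set Int :=
  match sets with
  | [] => conflicts
  | s :: rest =>
      pvPeel rest (rest.foldl (fun acc t => PySem.Set.union acc (PySem.Set.inter s t)) conflicts)

def get_conflict_pseudolabels_alt (label_to_inds : List (Int × List Int)) : List Int :=
  pvPeel (PySem.Dict.values (PySem.Dict.mk label_to_inds)) []

-- ===== PRECONDITION & SPEC =====
-- Pre_ excludes association lists with a duplicated key: those do not represent any Python dict
-- (Python collapses duplicate keys before A ever runs), so the List encoding is ambiguous there.
def Pre_get_conflict_pseudolabels (label_to_inds : List (Int × List Int)) : Prop :=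
  (label_to_inds.map (fun p => p.1)).Nodup
instance (label_to_inds : List (Int × List Int)) : Decidable (Pre_get_conflict_pseudolabels label_to_inds) := by unfold Pre_get_conflict_pseudolabels; infer_instance

def pvWitness_get_conflict_pseudolabels : (List (Int × List Int)) := [(0, [1, 2]), (1, [2, 3]), (2, [3])]

def Spec_get_conflict_pseudolabels (label_to_inds : List (Int × List Int)) (out : List Int) : Prop := out = get_conflict_pseudolabels_alt label_to_inds
instance (label_to_inds : List (Int × List Int)) (out : List Int) : Decidable (Spec_get_conflict_pseudolabels label_to_inds out) := by unfold Spec_get_conflict_pseudolabels; infer_instance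

-- ===== CLAIM (what is proved, stated in full; the proofs are below) =====
def Claim_equal_get_conflict_pseudolabels : Prop := ∀ (label_to_inds : List (Int × List Int)), Dom_get_conflict_pseudolabels label_to_inds → Pre_get_conflict_pseudolabels label_to_inds → Spec_get_conflict_pseudolabels label_to_inds (get_conflict_pseudolabels label_to_inds)

-- ===== LEMMAS AND PROOFS =====

-- membership in an intersection of two lists-as-sets
lemma mem_inter_iff (x : Int) (s t : List Int) :
    x ∈ PySem.Set.inter s t ↔ x ∈ s ∧ x ∈ t := by
  simp [PySem.Set.inter, PySem.Set.contains, List.mem_filter]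

lemma mem_add_self (s : List Int) (x : Int) : x ∈ PySem.Set.add s x := by
  by_cases h : x ∈ s <;> simp [PySem.Set.add, PySem.Set.contains, h]

lemma add_of_mem (s : List Int) (x : Int) (h : x ∈ s) : PySem.Set.add s x = s := by
  simp [PySem.Set.add, PySem.Set.contains, h]

lemma mem_update_of_mem (s xs : List Int) (x : Int) (h : x ∈ s) : x ∈ PySem.Set.update s xs := by
  induction xs generalizing s with
  | nil => exact h
  | cons y ys ih =>
      refine ih _ ?_
      by_cases hy : y ∈ s <;> simp [PySem.Set.add, PySem.Set.contains, hy, h]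

lemma mem_update_of_mem_arg (s xs : List Int) (x : Int) (h : x ∈ xs) :
    x ∈ PySem.Set.update s xs := by
  induction xs generalizing s with
  | nil => simp at h
  | cons y ys ih =>
      rcases List.mem_cons.mp h with rfl | h
      · show x ∈ PySem.Set.update (PySem.Set.add s x) ys
        exact mem_update_of_mem _ _ _ (mem_add_self s x)
      · show x ∈ PySem.Set.update (PySem.Set.add s y) ys
        exact ih _ h

lemma update_no_op (s xs : List Int) (h : ∀ x ∈ xs, x ∈ s) : PySem.Set.update s xs = s := by
  induction xs with
  | nil => rfl
  | cons y ys ih =>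
      have : PySem.Set.add s y = s := add_of_mem _ _ (h y (by simp))
      simpa [PySem.Set.update, this] using ih (fun x hx => h x (by simp [hx]))

-- one row of A's square fold, function over the full entry list
def pvRow (full : List (Int × List Int)) (p : Int × List Int) (acc : List Int) : List Int :=
  full.foldl
    (fun a q => if p.1 == q.1 then a
                else PySem.Set.update a (PySem.Set.inter p.2 q.2)) acc

def pvSq (full rows : List (Int × List Int)) (acc : List Int) : List Int :=
  rows.foldl (fun acc p => pvRow full p acc) acc

-- membership is preserved along a row-shaped fold
lemma mem_foldl_update (L : List (Int × List Int)) (f : Int × List Int → List Int)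
    (a : List Int) (x : Int) (h : x ∈ a) :
    x ∈ L.foldl (fun a q => PySem.Set.update a (f q)) a := by
  induction L generalizing a with
  | nil => exact h
  | cons q L ih => exact ih _ (mem_update_of_mem _ _ _ h)

lemma mem_foldl_update_of_hit (L : List (Int × List Int)) (f : Int × List Int → List Int)
    (x : Int) (r : Int × List Int) (hx : x ∈ f r) :
    ∀ (a : List Int), r ∈ L → x ∈ L.foldl (fun a q => PySem.Set.update a (f q)) a := by
  induction L with
  | nil => intro a hr; simp at hr
  | cons q L ih =>
      intro a hr
      rcases List.mem_cons.mp hr with rfl | hr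
      · exact mem_foldl_update L f _ x (mem_update_of_mem_arg _ _ _ hx)
      · exact ih _ hr

-- a row whose every update is already contained in the accumulator is the identity
lemma row_no_op (L : List (Int × List Int)) (p : Int × List Int) (a : List Int)
    (hkey : ∀ q ∈ L, p.1 ≠ q.1)
    (h : ∀ q ∈ L, ∀ x, x ∈ p.2 → x ∈ q.2 → x ∈ a) :
    L.foldl (fun a q => if p.1 == q.1 then a
                        else PySem.Set.update a (PySem.Set.inter p.2 q.2)) a = a := by
  induction L with
  | nil => rfl
  | cons q L ih =>
      have hne : (p.1 == q.1) = false := by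
        simpa using hkey q (by simp)
      have hsub : PySem.Set.update a (PySem.Set.inter p.2 q.2) = a := by
        refine update_no_op _ _ (fun x hx => ?_)
        rcases (mem_inter_iff x _ _).mp hx with ⟨h1, h2⟩
        exact h q (by simp) x h1 h2
      simpa [hne, hsub] using ih (fun r hr => hkey r (by simp [hr]))
        (fun r hr x h1 h2 => h r (by simp [hr]) x h1 h2)

-- MAIN LEMMA: the remaining rows of A's square fold equal B's worklist over the remaining sets
lemma sq_eq_peel (suf : List (Int × List Int)) :
    ∀ (pre : List (Int × List Int)) (acc : List Int),
    ((pre ++ suf).map (fun p => p.1)).Nodup →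
    (∀ q ∈ pre, ∀ r ∈ pre ++ suf, q.1 ≠ r.1 → ∀ x, x ∈ q.2 → x ∈ r.2 → x ∈ acc) →
    pvSq (pre ++ suf) suf acc = pvPeel (suf.map (fun p => p.2)) acc := by
  induction suf with
  | nil => intro pre acc _ _; rfl
  | cons p suf ih =>
      intro pre acc hnd hacc
      -- key disjointness facts from Nodup
      have hnd' : ((pre ++ p :: suf).map (fun p => p.1)).Nodup := hnd
      have hm : (pre.map (fun p => p.1) ++ (p.1 :: suf.map (fun p => p.1))).Nodup := by
        rw [← List.map_cons, ← List.map_append]; exact hnd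
      obtain ⟨hm1, hm2, hm3⟩ := List.nodup_append.mp hm
      have hpre_ne : ∀ q ∈ pre, p.1 ≠ q.1 := by
        intro q hq
        exact fun h => (hm3 q.1 (List.mem_map_of_mem hq) p.1 (by simp)) h.symm
      have hsuf_ne : ∀ q ∈ suf, p.1 ≠ q.1 := by
        intro q hq
        exact fun h => (List.nodup_cons.mp hm2).1 (h ▸ List.mem_map_of_mem hq)
      -- the row of p: prefix part is a no-op, the p==p test skips, the suffix part is B's inner fold
      have hrow : pvRow (pre ++ p :: suf) p acc =
          suf.foldl (fun a q => PySem.Set.update a (PySem.Set.inter p.2 q.2)) acc := by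
        have hsplit : pre ++ p :: suf = (pre ++ [p]) ++ suf := by simp
        unfold pvRow
        rw [hsplit, List.foldl_append, List.foldl_append]
        have h1 : List.foldl (fun a q => if p.1 == q.1 then a
              else PySem.Set.update a (PySem.Set.inter p.2 q.2)) acc pre = acc := by
          refine row_no_op pre p acc hpre_ne (fun q hq x h1 h2 => ?_)
          by_cases hqp : q.1 = p.1
          · exact absurd hqp.symm (hpre_ne q hq)
          · exact hacc q hq p (by simp) hqp x h2 h1
        rw [h1]
        have h2 : List.foldl (fun a q => if p.1 == q.1 then a
              else PySem.Set.update a (PySem.Set.inter p.2 q.2)) acc [p] = acc := by simp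
        rw [h2]
        refine PySem.List.foldl_congr_mem suf _ _ acc (fun a q hq => ?_)
        have : (p.1 == q.1) = false := by simpa using hsuf_ne q hq
        simp [this]
      -- fold over the new accumulator
      set acc' := suf.foldl (fun a q => PySem.Set.update a (PySem.Set.inter p.2 q.2)) acc with hacc'
      have hstep : pvSq (pre ++ p :: suf) (p :: suf) acc = pvSq (pre ++ p :: suf) suf (pvRow (pre ++ p :: suf) p acc) := rfl
      rw [hstep, hrow]
      have hassoc : pre ++ p :: suf = (pre ++ [p]) ++ suf := by simp
      rw [hassoc]
      have hrec := ih (pre ++ [p]) acc' (by simpa using hnd')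
        (by
          intro q hq r hr hne x hxq hxr
          have hr' : r ∈ pre ++ p :: suf := by
            simp only [List.append_assoc, List.cons_append, List.nil_append] at hr
            exact hr
          rcases List.mem_append.mp hq with hq | hq
          · -- q from the old prefix: it was already in acc
            exact mem_foldl_update _ _ _ _ (hacc q hq r hr' hne x hxq hxr)
          · -- q = p: r is in pre (use hacc symmetrically) or in suf (added by this row)
            have hq' : q = p := by simpa using hq
            subst hq'
            rcases List.mem_append.mp hr' with hr2 | hr2
            · exact mem_foldl_update _ _ _ _ (hacc r hr2 q (by simp) (Ne.symm hne) x hxr hxq)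
            · rcases List.mem_cons.mp hr2 with rfl | hr3
              · exact absurd rfl hne
              · exact mem_foldl_update_of_hit suf _ x r
                  ((mem_inter_iff x _ _).mpr ⟨hxq, hxr⟩) acc hr3)
      calc pvSq ((pre ++ [p]) ++ suf) suf acc'
          = pvPeel (suf.map (fun p => p.2)) acc' := hrec
        _ = pvPeel ((p :: suf).map (fun p => p.2)) acc := by
            simp only [List.map_cons, pvPeel, List.foldl_map]
            rfl

-- with no duplicate keys, A's dict lookup of an entry's key returns that entry's value
lemma getD_of_mem (l : List (Int × List Int)) (p : Int × List Int)
    (hnd : (l.map (fun p => p.1)).Nodup) (hp : p ∈ l) :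
    PySem.Dict.getD (PySem.Dict.mk l) p.1 [] = p.2 := by
  induction l with
  | nil => simp at hp
  | cons q l ih =>
      rcases List.mem_cons.mp hp with rfl | hp
      · simp [PySem.Dict.getD, PySem.Dict.get?]
      · rw [List.map_cons] at hnd
        obtain ⟨hh1, hh2⟩ := List.nodup_cons.mp hnd
        have hne : (q.1 == p.1) = false :=
          beq_eq_false_iff_ne.mpr (fun h => hh1 (h ▸ List.mem_map_of_mem hp))
        have := ih hh2 hp
        simpa [PySem.Dict.getD, PySem.Dict.get?, hne] using this

-- A's port, rewritten from key iteration + lookups to direct entry iteration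
lemma portA_eq_sq (l : List (Int × List Int))
    (hnd : (l.map (fun p => p.1)).Nodup) :
    get_conflict_pseudolabels l = pvSq l l [] := by
  unfold get_conflict_pseudolabels pvSq
  simp only [PySem.Dict.keys, List.foldl_map]
  refine PySem.List.foldl_congr_mem l _ _ [] (fun acc p hp => ?_)
  unfold pvRow
  refine PySem.List.foldl_congr_mem l _ _ acc (fun a q hq => ?_)
  rw [getD_of_mem l p hnd hp, getD_of_mem l q hnd hq]

-- ===== VERDICT (by name: the statement is the Claim_ definition above) =====
theorem get_conflict_pseudolabels_spec : Claim_equal_get_conflict_pseudolabels := by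
  intro l _ hpre
  unfold Spec_get_conflict_pseudolabels
  have h1 := portA_eq_sq l hpre
  have h2 := sq_eq_peel l [] [] (by simpa using hpre) (by intro q hq; simp at hq)
  simp only [List.nil_append] at h2
  rw [h1, h2]
  rfl
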